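-- pv_equiv track=rewrite | github.com/yordanoswuletaw/codefores-solution | E_Binary_Inversions.py | invertOnes
-- ===== SOURCE A (Python) =====
-- def invertOnes(binary, inversions, ones):
--     zeros = 0
--     result = inversions
--     for each in binary[::-1]:
--         if each:
--             ones -= 1
--             result = max(result, inversions + ones - zeros)
--         else:
--             zeros += 1
--     return result
-- ===== SOURCE B (Python) =====
-- def invertOnes(binary, inversions, ones):
--     # Forward single pass with precomputed totals: at each truthy element the
--     # elements strictly to its right are (total_ones - ones_seen - 1) ones and
--     # (total_zeros - zeros_seen) zeros; candidate matches A's reverse-scan value.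
--     total_ones = sum(1 for x in binary if x)
--     total_zeros = len(binary) - total_ones
--     result = inversions
--     ones_seen = 0
--     zeros_seen = 0
--     for x in binary:
--         if x:
--             result = max(result,
--                          inversions + ones - (total_ones - ones_seen)
--                          - (total_zeros - zeros_seen))
--             ones_seen += 1
--         else:
--             zeros_seen += 1
--     return result
-- ===== Notes on version B (the rewrite author's own statement) =====
-- stated objective: alternative
-- what changed: B replaces A's backward scan that mutates `ones` and counts zeros to the right by a forward scan over precomputed totals (total_ones/total_zeros) maintaining left-side ones/zeros counters and deriving the right-side counts by subtraction.
import Mathlib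
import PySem

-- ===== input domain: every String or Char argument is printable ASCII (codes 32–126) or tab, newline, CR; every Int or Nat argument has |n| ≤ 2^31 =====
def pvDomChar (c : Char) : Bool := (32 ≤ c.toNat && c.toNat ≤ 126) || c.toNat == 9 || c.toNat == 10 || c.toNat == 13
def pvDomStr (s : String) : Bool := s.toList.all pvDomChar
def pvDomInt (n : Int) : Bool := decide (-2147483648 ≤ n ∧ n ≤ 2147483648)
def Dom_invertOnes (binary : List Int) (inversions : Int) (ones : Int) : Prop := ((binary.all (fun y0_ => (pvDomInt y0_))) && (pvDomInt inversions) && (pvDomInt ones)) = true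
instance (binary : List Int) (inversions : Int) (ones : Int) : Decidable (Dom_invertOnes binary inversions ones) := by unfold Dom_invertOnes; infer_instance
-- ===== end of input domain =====

-- B replaces A's backward scan maintaining right-zeros and a mutated `ones` by a
-- forward scan over precomputed totals maintaining left counts (alternative decomposition).

-- ===== PORT A =====
-- binary[::-1] is ported as binary.reverse (exact for step -1 full slice);
-- `if each:` on an int is `each ≠ 0`.
def invertOnes (binary : List Int) (inversions : Int) (ones : Int) : Int :=
  (binary.reverse.foldl
    (fun (st : Int × Int × Int) (each : Int) =>
      let (zeros, result, o) := st
      if each ≠ 0 then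
        (zeros, max result (inversions + (o - 1) - zeros), o - 1)
      else
        (zeros + 1, result, o))
    (0, inversions, ones)).2.1

-- ===== PORT B =====
def invertOnes_alt (binary : List Int) (inversions : Int) (ones : Int) : Int :=
  let totalOnes : Int := binary.foldl (fun acc x => if x ≠ 0 then acc + 1 else acc) 0
  let totalZeros : Int := (binary.length : Int) - totalOnes
  (binary.foldl
    (fun (st : Int × Int × Int) (x : Int) =>
      let (onesSeen, zerosSeen, result) := st
      if x ≠ 0 then
        (onesSeen + 1, zerosSeen,
          max result (inversions + ones - (totalOnes - onesSeen) - (totalZeros - zerosSeen)))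
      else
        (onesSeen, zerosSeen + 1, result))
    (0, 0, inversions)).2.2

-- ===== PRECONDITION & SPEC =====
def Spec_invertOnes (binary : List Int) (inversions : Int) (ones : Int) (out : Int) : Prop := out = invertOnes_alt binary inversions ones
instance (binary : List Int) (inversions : Int) (ones : Int) (out : Int) : Decidable (Spec_invertOnes binary inversions ones out) := by unfold Spec_invertOnes; infer_instance

-- ===== CLAIM (what is proved, stated in full; the proofs are below) =====
def Claim_equal_invertOnes : Prop := ∀ (binary : List Int) (inversions : Int) (ones : Int), Dom_invertOnes binary inversions ones → Spec_invertOnes binary inversions ones (invertOnes binary inversions ones)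

-- ===== LEMMAS AND PROOFS =====

-- number of nonzero / zero entries, as Int
def nOnes : List Int → Int
  | [] => 0
  | x :: xs => (if x ≠ 0 then 1 else 0) + nOnes xs

def nZeros : List Int → Int
  | [] => 0
  | x :: xs => (if x ≠ 0 then 0 else 1) + nZeros xs

theorem nOnes_add_nZeros (l : List Int) : nOnes l + nZeros l = (l.length : Int) := by
  induction l with
  | nil => simp [nOnes, nZeros]
  | cons x xs ih =>
    by_cases h : x ≠ 0 <;> simp [nOnes, nZeros, h] <;> omega

-- structural value of A's reverse fold (result component)
def coreA (inv o z : Int) : List Int → Int → Int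
  | [], r => r
  | x :: xs, r =>
    if x ≠ 0 then max (coreA inv o z xs r) (inv + o - 1 - z - (xs.length : Int))
    else coreA inv o z xs r

theorem foldA_eq (inv : Int) (l : List Int) : ∀ z r o,
    (l.reverse.foldl
      (fun (st : Int × Int × Int) (each : Int) =>
        let (zeros, result, oo) := st
        if each ≠ 0 then
          (zeros, max result (inv + (oo - 1) - zeros), oo - 1)
        else
          (zeros + 1, result, oo))
      (z, r, o))
    = (z + nZeros l, coreA inv o z l r, o - nOnes l) := by
  induction l with
  | nil => intro z r o; simp [nZeros, nOnes, coreA]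
  | cons x xs ih =>
    intro z r o
    rw [List.reverse_cons, List.foldl_append, ih]
    by_cases h : x ≠ 0
    · simp only [List.foldl, h, ne_eq, not_false_eq_true, if_pos]
      have hl := nOnes_add_nZeros xs
      refine Prod.ext ?_ (Prod.ext ?_ ?_)
      · simp [nZeros, h]
      · simp only [coreA, h, ne_eq, not_false_eq_true, if_pos]
        congr 1
        omega
      · simp [nOnes, h]; ring
    · simp only [List.foldl, h, ite_false]
      have h0 : x = 0 := by omega
      refine Prod.ext ?_ (Prod.ext ?_ ?_)
      · simp [nZeros, h0]; ring
      · simp [coreA, h0]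
      · simp [nOnes, h0]

-- structural value of B's forward fold; the candidate depends only on s = remaining total
def coreB (inv o : Int) : List Int → Int → Int → Int
  | [], r, _ => r
  | x :: xs, r, s =>
    if x ≠ 0 then coreB inv o xs (max r (inv + o - s)) (s - 1)
    else coreB inv o xs r (s - 1)

theorem foldB_eq (inv o T1 T0 : Int) (l : List Int) : ∀ os zs r,
    (l.foldl
      (fun (st : Int × Int × Int) (x : Int) =>
        let (onesSeen, zerosSeen, result) := st
        if x ≠ 0 then
          (onesSeen + 1, zerosSeen,
            max result (inv + o - (T1 - onesSeen) - (T0 - zerosSeen)))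
        else
          (onesSeen, zerosSeen + 1, result))
      (os, zs, r)).2.2
    = coreB inv o l r ((T1 - os) + (T0 - zs)) := by
  induction l with
  | nil => intro os zs r; simp [coreB]
  | cons x xs ih =>
    intro os zs r
    rw [List.foldl_cons]
    by_cases h : x ≠ 0
    · simp only [h, ne_eq, not_false_eq_true, if_pos]
      rw [ih, coreB, if_pos h]
      have e1 : inv + o - (T1 - os) - (T0 - zs) = inv + o - (T1 - os + (T0 - zs)) := by ring
      have e2 : T1 - (os + 1) + (T0 - zs) = T1 - os + (T0 - zs) - 1 := by ring
      rw [e1, e2]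
    · simp only [h, ite_false, ne_eq]
      rw [ih, coreB, if_neg h]
      have e2 : T1 - os + (T0 - (zs + 1)) = T1 - os + (T0 - zs) - 1 := by ring
      rw [e2]

-- B's total-ones fold equals nOnes
theorem foldOnes_eq (l : List Int) : ∀ acc,
    l.foldl (fun acc x => if x ≠ 0 then acc + 1 else acc) acc = acc + nOnes l := by
  induction l with
  | nil => intro acc; simp [nOnes]
  | cons x xs ih =>
    intro acc
    rw [List.foldl_cons]
    by_cases h : x ≠ 0
    · simp only [h, ne_eq, not_false_eq_true, if_pos]
      rw [ih]
      simp [nOnes, h]; ring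
    · simp only [h, ite_false, ne_eq]
      rw [ih]
      have h0 : x = 0 := by omega
      simp [nOnes, h0]

-- coreA (with z = 0) commutes max into its accumulator
theorem coreA_max (inv o : Int) (l : List Int) : ∀ a b,
    coreA inv o 0 l (max a b) = max (coreA inv o 0 l a) b := by
  induction l with
  | nil => intro a b; simp [coreA]
  | cons x xs ih =>
    intro a b
    by_cases h : x ≠ 0
    · rw [coreA, if_pos h, coreA, if_pos h, ih]
      exact max_right_comm _ _ _
    · rw [coreA, if_neg h, coreA, if_neg h, ih]

theorem coreB_eq_coreA (inv o : Int) (l : List Int) : ∀ r,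
    coreB inv o l r (l.length : Int) = coreA inv o 0 l r := by
  induction l with
  | nil => intro r; simp [coreA, coreB]
  | cons x xs ih =>
    intro r
    have h1 : ((x :: xs).length : Int) - 1 = (xs.length : Int) := by simp
    by_cases h : x ≠ 0
    · rw [coreB, if_pos h, coreA, if_pos h]
      have h2 : inv + o - ((x :: xs).length : Int) = inv + o - 1 - 0 - (xs.length : Int) := by
        simp; ring
      rw [h1, h2, ih, coreA_max]
    · rw [coreB, if_neg h, coreA, if_neg h, h1, ih]

-- ===== VERDICT (by name: the statement is the Claim_ definition above) =====
theorem invertOnes_spec : Claim_equal_invertOnes := by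
  intro binary inv ones _
  unfold Spec_invertOnes invertOnes invertOnes_alt
  rw [foldA_eq]
  have hT : binary.foldl (fun acc x => if x ≠ 0 then acc + 1 else acc) 0 = nOnes binary := by
    rw [foldOnes_eq]; omega
  simp only [hT]
  rw [foldB_eq]
  have hs : (nOnes binary - 0) + (((binary.length : Int) - nOnes binary) - 0)
      = (binary.length : Int) := by omega
  rw [hs, coreB_eq_coreA]
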